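-- pv_equiv track=rewrite | github.com/Fuegos/FindStr | main.py | createMask
-- ===== SOURCE A (Python) =====
-- def createMask(file):
--     mask = {}
--     for index, str in enumerate(file):
--         if str[0] in mask:
--             mask[str[0]]["end"] = index + 1
--         else:
--             mask[str[0]] = {"start": index, "end": index + 1}
--     return mask
-- ===== SOURCE B (Python) =====
-- def createMask(file):
--     firsts = [s[0] for s in file]
--     rev = firsts[::-1]
--     n = len(firsts)
--     return {c: {"start": firsts.index(c), "end": n - rev.index(c)}
--             for c in dict.fromkeys(firsts)}
-- ===== Notes on version B (the rewrite author's own statement) =====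
-- stated objective: alternative
-- what changed: B keeps no incremental per-key state at all: it extracts the list of first characters, dedups it with dict.fromkeys to get the keys in first-occurrence order, and derives each range by search -- start = firsts.index(c), end = n - firsts[::-1].index(c) -- instead of A's single pass that updates start/end entries in a dict while scanning.
import Mathlib
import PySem

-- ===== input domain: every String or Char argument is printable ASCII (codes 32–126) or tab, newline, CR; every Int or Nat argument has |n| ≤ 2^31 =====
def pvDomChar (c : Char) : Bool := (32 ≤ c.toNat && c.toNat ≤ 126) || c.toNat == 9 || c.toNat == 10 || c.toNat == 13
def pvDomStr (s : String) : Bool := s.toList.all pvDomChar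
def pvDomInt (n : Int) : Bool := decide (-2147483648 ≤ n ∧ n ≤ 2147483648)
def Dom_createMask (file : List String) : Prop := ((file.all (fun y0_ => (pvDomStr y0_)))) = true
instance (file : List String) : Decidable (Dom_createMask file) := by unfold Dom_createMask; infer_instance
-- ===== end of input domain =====

-- B keeps no incremental per-key state: it dedups the first-character list (dict.fromkeys) and
-- derives each range by search — start = firsts.index(c), end = n - firsts[::-1].index(c)
-- (alternative decomposition; same results, no speed claim).

-- s[0] as a one-character string (total form; exact under Pre_, which excludes empty strings)
def pvKey (s : String) : String := String.ofList [((PySem.Str.pyGet? s 0).getD ' ')]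

-- ===== PORT A =====
def createMaskStep (mask : PySem.Dict String (PySem.Dict String Int)) (p : Int × String) :
    PySem.Dict String (PySem.Dict String Int) :=
  if mask.contains (pvKey p.2) then
    mask.insert (pvKey p.2) (((mask.get? (pvKey p.2)).getD PySem.Dict.empty).insert "end" (p.1 + 1))
  else
    mask.insert (pvKey p.2) (PySem.Dict.ofList [("start", p.1), ("end", p.1 + 1)])

def createMask (file : List String) : List (String × List (String × Int)) :=
  (((PySem.List.enumerate file 0).foldl createMaskStep PySem.Dict.empty).items).map
    (fun p => (p.1, p.2.items))

-- ===== PORT B =====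
def createMask_alt (file : List String) : List (String × List (String × Int)) :=
  let firsts := file.map pvKey
  let rev := (PySem.List.slice? firsts none none (-1)).getD []
  let n := PySem.List.len firsts
  (PySem.List.dedup firsts).map (fun c =>
    (c, [("start", (((PySem.List.index? firsts c).getD 0 : Nat) : Int)),
         ("end", n - (((PySem.List.index? rev c).getD 0 : Nat) : Int))]))

-- ===== PRECONDITION & SPEC =====
-- Pre_ excludes files containing an empty string: there both Pythons raise IndexError on s[0].
def Pre_createMask (file : List String) : Prop := ∀ s ∈ file, s ≠ ""
instance (file : List String) : Decidable (Pre_createMask file) := by unfold Pre_createMask; infer_instance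
def pvWitness_createMask : List String := ["ab", "bc", "az"]

def Spec_createMask (file : List String) (out : List (String × List (String × Int))) : Prop := out = createMask_alt file
instance (file : List String) (out : List (String × List (String × Int))) : Decidable (Spec_createMask file out) := by unfold Spec_createMask; infer_instance

-- ===== CLAIM (what is proved, stated in full; the proofs are below) =====
def Claim_equal_createMask : Prop := ∀ (file : List String), Dom_createMask file → Pre_createMask file → Spec_createMask file (createMask file)

-- ===== LEMMAS AND PROOFS =====

-- the range dict B derives for key c from the list fs of first characters
def pvEntry (fs : List String) (c : String) : PySem.Dict String Int :=
  PySem.Dict.mk [("start", (((PySem.List.index? fs c).getD 0 : Nat) : Int)),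
                 ("end", (fs.length : Int) - (((PySem.List.index? fs.reverse c).getD 0 : Nat) : Int))]

-- the whole dict A's loop builds, expressed B's way
def pvModel (fs : List String) : PySem.Dict String (PySem.Dict String Int) :=
  PySem.Dict.mk ((PySem.List.dedup fs).map (fun c => (c, pvEntry fs c)))

theorem pvDedup_append_mem (fs : List String) (c : String) (h : c ∈ fs) :
    PySem.List.dedup (fs ++ [c]) = PySem.List.dedup fs := by
  simp only [PySem.List.dedup_eq_ofList, PySem.Set.ofList_eq_foldl, List.foldl_append, List.foldl_cons, List.foldl_nil]
  rw [← PySem.Set.ofList_eq_foldl, PySem.Set.add_of_mem (by simpa [PySem.Set.mem_ofList] using h)]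
theorem pvDedup_append_not_mem (fs : List String) (c : String) (h : c ∉ fs) :
    PySem.List.dedup (fs ++ [c]) = PySem.List.dedup fs ++ [c] := by
  simp only [PySem.List.dedup_eq_ofList, PySem.Set.ofList_eq_foldl, List.foldl_append, List.foldl_cons, List.foldl_nil]
  rw [← PySem.Set.ofList_eq_foldl, PySem.Set.add_of_not_mem (by simpa [PySem.Set.mem_ofList] using h)]
theorem pvEntry_append_other (fs : List String) (c d : String) (hd : d ∈ fs) (hne : d ≠ c) :
    pvEntry (fs ++ [c]) d = pvEntry fs d := by
  obtain ⟨k, hk⟩ := Option.isSome_iff_exists.mp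
    ((PySem.List.index?_isSome_iff fs.reverse d).mpr (List.mem_reverse.mpr hd))
  unfold pvEntry
  rw [PySem.List.index?_append_of_mem _ hd, List.reverse_append]
  simp only [List.reverse_singleton, List.singleton_append]
  rw [PySem.List.index?_cons_of_ne fs.reverse (Ne.symm hne), hk]
  simp only [Option.map_some, Option.getD_some, List.length_append, List.length_singleton]
  have h2 : ((fs.length + 1 : Nat) : Int) - ((k + 1 : Nat) : Int) = (fs.length : Int) - (k : Int) := by
    push_cast; ring
  rw [h2]

-- keys of the model
theorem pvKeys_model (fs : List String) : (pvModel fs).keys = PySem.List.dedup fs := by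
  simp [pvModel, PySem.Dict.keys, Function.comp_def]

theorem pvContains_model (fs : List String) (c : String) :
    (pvModel fs).contains c = decide (c ∈ fs) := by
  rw [PySem.Dict.contains_eq_decide_mem_keys, pvKeys_model]
  simp

theorem pvGet?_model (fs : List String) (c : String) (h : c ∈ fs) :
    (pvModel fs).get? c = some (pvEntry fs c) := by
  apply PySem.Dict.get?_of_mem_items
  · simp only [pvModel]
    exact List.mem_map.mpr ⟨c, by simpa [PySem.List.mem_dedup] using h, rfl⟩
  · rw [pvKeys_model]; exact PySem.List.nodup_dedup fs

-- entry for the repeated key: updating "end" gives pvEntry of the extended list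
theorem pvEntry_update (fs : List String) (c : String) (h : c ∈ fs) :
    (pvEntry fs c).insert "end" ((fs.length : Int) + 1) = pvEntry (fs ++ [c]) c := by
  unfold pvEntry
  rw [PySem.List.index?_append_of_mem _ h, List.reverse_append]
  simp only [List.reverse_singleton, List.singleton_append, PySem.List.index?_cons_self]
  simp [PySem.Dict.insert, PySem.Dict.contains]

-- entry for a fresh key
theorem pvEntry_fresh (fs : List String) (c : String) (h : c ∉ fs) :
    PySem.Dict.ofList [("start", (fs.length : Int)), ("end", (fs.length : Int) + 1)] = pvEntry (fs ++ [c]) c := by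
  unfold pvEntry
  rw [PySem.List.index?_append_singleton_self fs c h, List.reverse_append]
  simp only [List.reverse_singleton, List.singleton_append, PySem.List.index?_cons_self]
  simp [PySem.Dict.ofList, PySem.Dict.update, PySem.Dict.insert, PySem.Dict.empty, PySem.Dict.contains]

theorem pvStepModel (fs : List String) (s : String) :
    createMaskStep (pvModel fs) ((fs.length : Int), s) = pvModel (fs ++ [pvKey s]) := by
  unfold createMaskStep
  dsimp only
  generalize pvKey s = c
  by_cases h : c ∈ fs
  · have hcon : (pvModel fs).contains c = true := by rw [pvContains_model]; simpa using h
    rw [hcon]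
    simp only [if_true]
    rw [pvGet?_model fs c h]
    simp only [Option.getD_some]
    rw [pvEntry_update fs c h]
    -- insert existing key into model dict
    apply PySem.Dict.ext
    rw [PySem.Dict.items_insert_of_contains _ _ hcon]
    simp only [pvModel, pvDedup_append_mem fs c h]
    rw [List.map_map]
    apply List.map_congr_left
    intro d hd
    have hdfs : d ∈ fs := (PySem.List.mem_dedup fs d).mp hd
    by_cases hdc : d = c
    · subst hdc; simp
    · simp only [Function.comp_def]
      rw [if_neg (by simpa using hdc)]
      rw [pvEntry_append_other fs c d hdfs hdc]
  · have hcon : (pvModel fs).contains c = false := by rw [pvContains_model]; simpa using h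
    rw [hcon]
    simp only [Bool.false_eq_true, if_false]
    apply PySem.Dict.ext
    rw [PySem.Dict.items_insert_of_not_contains _ _ hcon]
    simp only [pvModel, pvDedup_append_not_mem fs c h, List.map_append, List.map_cons, List.map_nil]
    congr 1
    · apply List.map_congr_left
      intro d hd
      have hdfs : d ∈ fs := (PySem.List.mem_dedup fs d).mp hd
      rw [pvEntry_append_other fs c d hdfs (fun he => h (he ▸ hdfs))]
    · rw [pvEntry_fresh fs c h]

theorem pvFoldModel (file : List String) :
    (PySem.List.enumerate file 0).foldl createMaskStep PySem.Dict.empty = pvModel (file.map pvKey) := by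
  induction file using List.reverseRecOn with
  | nil => rfl
  | append_singleton l x ih =>
    rw [PySem.List.enumerate_append, List.foldl_append, ih]
    simp only [PySem.List.enumerate_cons, PySem.List.enumerate_nil, List.foldl_cons, List.foldl_nil]
    have hlen : (0 : Int) + l.length = ((l.map pvKey).length : Int) := by simp
    rw [hlen, pvStepModel (l.map pvKey) x]
    simp

-- ===== VERDICT (by name: the statement is the Claim_ definition above) =====
theorem createMask_spec : Claim_equal_createMask := by
  intro file _ _
  unfold Spec_createMask createMask createMask_alt
  rw [pvFoldModel]
  simp [pvModel, pvEntry, PySem.List.slice?_none_none_neg_one, List.map_map, Function.comp_def]
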